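-- pv_equiv track=rewrite | github.com/goschtl/zope | Sandbox/ulif/grok-adminui-with-principals/src/grok/admin/view.py | getDottedPathDict
-- ===== SOURCE A (Python) =====
-- def getDottedPathDict(dotted_path):
--     """Get a dict containing parts of a dotted path as links.
--     """
--     if dotted_path is None:
--         return {}
--
--     result = []
--     part_path = ""
--     for part in dotted_path.split('.'):
--         name = part
--         if part_path != "":
--             name = "." + part
--         part_path += part
--         result.append({
--             'name':name,
--             'url':"/docgrok/%s" % (part_path,)
--             })
--         part_path += "/"
--     return result
-- ===== SOURCE B (Python) =====
-- def getDottedPathDict(dotted_path):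
--     """Get a dict containing parts of a dotted path as links."""
--     if dotted_path is None:
--         return {}
--     parts = dotted_path.split('.')
--     return [{'name': part if i == 0 else '.' + part,
--              'url': "/docgrok/%s" % ('/'.join(parts[:i + 1]),)}
--             for i, part in enumerate(parts)]
-- ===== Notes on version B (the rewrite author's own statement) =====
-- stated objective: simpler
-- what changed: Replaces the threaded mutable part_path accumulator (with its trailing-slash bookkeeping) by a single comprehension over enumerate(parts) that rebuilds each url prefix by slash-joining parts[:i+1]; Pre_ excludes dotted_path=None, where both return {} — a dict, not a value of the declared list type.
-- outside the precondition, e.g. on getDottedPathDict(None): A returns {}, B returns {}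
import Mathlib
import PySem

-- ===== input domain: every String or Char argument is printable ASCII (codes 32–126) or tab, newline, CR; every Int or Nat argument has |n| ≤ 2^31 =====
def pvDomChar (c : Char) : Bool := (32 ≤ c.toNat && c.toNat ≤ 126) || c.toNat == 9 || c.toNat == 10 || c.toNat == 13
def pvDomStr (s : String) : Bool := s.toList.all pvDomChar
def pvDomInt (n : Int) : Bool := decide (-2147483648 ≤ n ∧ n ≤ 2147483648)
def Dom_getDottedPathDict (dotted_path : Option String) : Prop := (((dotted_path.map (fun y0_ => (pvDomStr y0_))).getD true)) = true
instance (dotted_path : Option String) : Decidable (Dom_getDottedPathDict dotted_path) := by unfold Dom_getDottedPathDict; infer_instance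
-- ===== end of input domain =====

-- B replaces A's threaded part_path accumulator by an enumerate comprehension rebuilding each url prefix by slash-joining parts[:i+1]; objective: simpler.


-- ===== PORT A =====
-- dotted_path.split('.') : sep "." ≠ "", so Str.split? is always `some`; `.getD []` only discharges the Option.
def getDottedPathDict (dotted_path : Option String) : List (List (String × String)) :=
  match dotted_path with
  | none => []
  | some dp =>
    (((PySem.Str.split? dp ".").getD []).foldl
      (fun (st : List (List (String × String)) × String) part =>
        (st.1 ++ [[("name", if st.2 == "" then part else "." ++ part),
                   ("url", "/docgrok/" ++ (st.2 ++ part))]],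
         (st.2 ++ part) ++ "/"))
      ([], "")).1

-- ===== PORT B =====
def getDottedPathDict_alt (dotted_path : Option String) : List (List (String × String)) :=
  match dotted_path with
  | none => []
  | some dp =>
    let parts := (PySem.Str.split? dp ".").getD []
    (PySem.List.enumerate parts).map (fun q =>
      [("name", if q.1 == 0 then q.2 else "." ++ q.2),
       ("url", "/docgrok/" ++ PySem.Str.join "/" (PySem.List.slice parts none (some (q.1 + 1))))])

-- ===== PRECONDITION & SPEC =====
-- Pre_ excludes only dotted_path = None, where A returns the empty dict {} — not a value of the declared list type.
def Pre_getDottedPathDict (dotted_path : Option String) : Prop := dotted_path ≠ none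
instance (dotted_path : Option String) : Decidable (Pre_getDottedPathDict dotted_path) := by unfold Pre_getDottedPathDict; infer_instance
def pvWitness_getDottedPathDict : Option String := (some "grok.admin.view")
def Spec_getDottedPathDict (dotted_path : Option String) (out : List (List (String × String))) : Prop := out = getDottedPathDict_alt dotted_path
instance (dotted_path : Option String) (out : List (List (String × String))) : Decidable (Spec_getDottedPathDict dotted_path out) := by unfold Spec_getDottedPathDict; infer_instance

-- ===== CLAIM (what is proved, stated in full; the proofs are below) =====
def Claim_equal_getDottedPathDict : Prop := ∀ (dotted_path : Option String), Dom_getDottedPathDict dotted_path → Pre_getDottedPathDict dotted_path → Spec_getDottedPathDict dotted_path (getDottedPathDict dotted_path)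

-- ===== LEMMAS AND PROOFS =====

-- the common shape both ports compute, read off the remaining parts and the prefix-path string pp
def pvChain (pp : String) : List String → List (List (String × String))
  | [] => []
  | p :: ps => [("name", "." ++ p), ("url", "/docgrok/" ++ (pp ++ p))] :: pvChain ((pp ++ p) ++ "/") ps

theorem pvSlashNe (s : String) : s ++ "/" ≠ "" := by
  intro h
  have := congrArg String.toList h
  simp at this

theorem pvJoinSingleton (p : String) : PySem.Str.join "/" [p] = p := by
  apply String.toList_inj.mp
  simp [PySem.Str.toList_join, PySem.Chars.join_singleton]

theorem pvJoinSnoc : ∀ (pre : List String) (a p : String),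
    PySem.Str.join "/" (a :: pre ++ [p]) = PySem.Str.join "/" (a :: pre) ++ "/" ++ p := by
  intro pre
  induction pre with
  | nil =>
    intro a p
    apply String.toList_inj.mp
    simp [PySem.Str.toList_join, PySem.Chars.join_cons_cons, PySem.Chars.join_singleton]
  | cons b pre ih =>
    intro a p
    apply String.toList_inj.mp
    have h1 := congrArg String.toList (ih b p)
    simp only [PySem.Str.toList_join, List.map_append, List.map,
      List.cons_append] at h1 ⊢
    rw [PySem.Chars.join_cons_cons, h1]
    simp [String.toList_append, PySem.Chars.join_cons_cons]

-- A's loop: once part_path is nonempty, it appends pvChain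
theorem pvA_fold : ∀ (parts : List String) (acc : List (List (String × String))) (pp : String), pp ≠ "" →
    ((parts.foldl
      (fun (st : List (List (String × String)) × String) part =>
        (st.1 ++ [[("name", if st.2 == "" then part else "." ++ part),
                   ("url", "/docgrok/" ++ (st.2 ++ part))]],
         (st.2 ++ part) ++ "/"))
      (acc, pp)).1) = acc ++ pvChain pp parts := by
  intro parts
  induction parts with
  | nil => intro acc pp h; simp [pvChain]
  | cons p ps ih =>
    intro acc pp h
    rw [List.foldl_cons]
    have hne : (pp == "") = false := by simp [h]
    simp only [hne, Bool.false_eq_true, if_false]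
    rw [ih _ _ (pvSlashNe _)]
    simp [pvChain]

-- B's comprehension over the tail: with a nonempty processed prefix `pre`, it also builds pvChain
theorem pvB_main : ∀ (ps pre : List String) (a : String),
    (PySem.List.enumerate ps ((a :: pre).length : Int)).map
      (fun q => [("name", "." ++ q.2),
                 ("url", "/docgrok/" ++ PySem.Str.join "/" (((a :: pre) ++ ps).take (q.1 + 1).toNat))])
    = pvChain (PySem.Str.join "/" (a :: pre) ++ "/") ps := by
  intro ps
  induction ps with
  | nil => intro pre a; simp [pvChain, PySem.List.enumerate]
  | cons p ps ih =>
    intro pre a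
    rw [PySem.List.enumerate_cons, List.map_cons]
    have htake : ((a :: pre) ++ p :: ps).take ((((a :: pre).length : Int) + 1).toNat) = (a :: pre) ++ [p] := by
      have h0 : ((((a :: pre).length : Int)) + 1).toNat = (a :: pre).length + 1 := by omega
      have h2 : List.take ((a :: pre).length + 1) (a :: pre) = a :: pre :=
        List.take_of_length_le (by omega)
      have h3 : (a :: pre).length + 1 - (a :: pre).length = 1 := by omega
      rw [h0, List.take_append, h2, h3]
      simp
    have hhead : [("name", "." ++ p),
        ("url", "/docgrok/" ++ PySem.Str.join "/" (((a :: pre) ++ p :: ps).take ((((a :: pre).length : Int)) + 1).toNat))]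
        = [("name", "." ++ p), ("url", "/docgrok/" ++ ((PySem.Str.join "/" (a :: pre) ++ "/") ++ p))] := by
      rw [htake, pvJoinSnoc]
    have htail := ih (pre ++ [p]) a
    have hlist : (a :: (pre ++ [p])) ++ ps = (a :: pre) ++ p :: ps := by simp
    have hlen2 : ((a :: (pre ++ [p])).length : Int) = ((a :: pre).length : Int) + 1 := by
      have : (a :: (pre ++ [p])).length = (a :: pre).length + 1 := by simp
      rw [this]
      push_cast
      ring
    rw [hlist, hlen2] at htail
    rw [pvChain]
    refine congrArg₂ List.cons ?_ ?_
    · exact hhead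
    · rw [htail]
      have harg : PySem.Str.join "/" (a :: (pre ++ [p])) ++ "/"
          = ((PySem.Str.join "/" (a :: pre) ++ "/") ++ p) ++ "/" := by
        rw [show a :: (pre ++ [p]) = a :: pre ++ [p] by simp, pvJoinSnoc]
      rw [harg]

theorem pvEmptyAppend (p : String) : "" ++ p = p := by
  apply String.toList_inj.mp
  simp

-- ===== VERDICT (by name: the statement is the Claim_ definition above) =====
theorem getDottedPathDict_spec : Claim_equal_getDottedPathDict := by
  intro dp _ hpre
  unfold Spec_getDottedPathDict getDottedPathDict getDottedPathDict_alt
  cases dp with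
  | none => exact absurd rfl hpre
  | some s =>
    simp only []
    cases hp : (PySem.Str.split? s ".").getD [] with
    | nil => simp [PySem.List.enumerate]
    | cons p ps =>
      rw [List.foldl_cons]
      simp only [beq_self_eq_true, if_true]
      rw [pvA_fold ps _ _ (pvSlashNe _)]
      rw [PySem.List.enumerate_cons, List.map_cons]
      have hhead : [("name", if (0 : Int) == 0 then p else "." ++ p),
          ("url", "/docgrok/" ++ PySem.Str.join "/" (PySem.List.slice (p :: ps) none (some ((0 : Int) + 1))))]
          = [("name", p), ("url", "/docgrok/" ++ ("" ++ p))] := by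
        rw [PySem.List.slice_to (p :: ps) (by omega)]
        simp [pvJoinSingleton]
      have htail : (PySem.List.enumerate ps ((0 : Int) + 1)).map (fun q =>
            [("name", if q.1 == 0 then q.2 else "." ++ q.2),
             ("url", "/docgrok/" ++ PySem.Str.join "/" (PySem.List.slice (p :: ps) none (some (q.1 + 1))))])
          = pvChain (("" ++ p) ++ "/") ps := by
        rw [List.map_congr_left (l := PySem.List.enumerate ps ((0 : Int) + 1))
          (g := fun q => [("name", "." ++ q.2),
             ("url", "/docgrok/" ++ PySem.Str.join "/" ((([p] : List String) ++ ps).take (q.1 + 1).toNat))])]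
        · have hm := pvB_main ps [] p
          norm_num [pvJoinSingleton] at hm
          rw [pvEmptyAppend]
          norm_num [hm]
        · intro q hq
          rw [PySem.List.mem_enumerate_iff] at hq
          obtain ⟨k, hk, rfl⟩ := hq
          have h0 : ((0 : Int) + 1 + (k : Int) == 0) = false := by
            simp; omega
          rw [h0]
          simp only [Bool.false_eq_true, if_false]
          rw [PySem.List.slice_to (p :: ps) (by omega)]
          simp
      rw [hhead, htail]
      simp
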